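-- pv_equiv track=rewrite | github.com/mlordjames/aws-open-payments-pipeline | scripts/recordstotal.py | extract_totals_by_year
-- ===== SOURCE A (Python) =====
-- from typing import Any, Dict, List, Optional, Tuple
--
-- def extract_totals_by_year(payload: Any, years: List[int]) -> Dict[str, Optional[int]]:
--     """
--     From payload["summaryByAvailableYear"], map programYear -> generalTransactions
--     into columns: total_YYYY
--
--     Missing years become 0 (or you can change to None if you prefer).
--     """
--     out: Dict[str, Optional[int]] = {f"total_{y}": 0 for y in years}
--
--     if not isinstance(payload, dict):
--         return out
--
--     items = payload.get("summaryByAvailableYear")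
--     if not isinstance(items, list):
--         return out
--
--     for row in items:
--         if not isinstance(row, dict):
--             continue
--         py = row.get("programYear")
--         gt = row.get("generalTransactions")
--
--         # Only map numeric years we care about
--         if py is None:
--             continue
--         try:
--             py_int = int(str(py))
--         except Exception:
--             continue
--
--         if py_int in years:
--             # generalTransactions is expected numeric; fallback safe cast
--             try:
--                 out[f"total_{py_int}"] = int(gt) if gt is not None else 0
--             except Exception:
--                 out[f"total_{py_int}"] = 0
--
--     return out
-- ===== SOURCE B (Python) =====
-- from typing import Any, Dict, List, Optional
--
-- def _first_total(rows, y):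
--     """Value for column y: first match in the reversed row list, else 0."""
--     for row in rows:
--         if not isinstance(row, dict):
--             continue
--         py = row.get("programYear")
--         if py is None:
--             continue
--         try:
--             py_int = int(str(py))
--         except Exception:
--             continue
--         if py_int != y:
--             continue
--         gt = row.get("generalTransactions")
--         try:
--             return int(gt) if gt is not None else 0
--         except Exception:
--             return 0
--     return 0
--
-- def extract_totals_by_year(payload: Any, years: List[int]) -> Dict[str, Optional[int]]:
--     """Each output column is computed independently: scan the rows in reverse and
--     take the first row whose programYear matches (A's forward last-write wins
--     equals reverse first-match); no mutable accumulator dict is maintained."""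
--     if isinstance(payload, dict):
--         items = payload.get("summaryByAvailableYear")
--         if not isinstance(items, list):
--             items = []
--     else:
--         items = []
--     rows = list(reversed(items))
--     return {f"total_{y}": _first_total(rows, y) for y in years}
-- ===== Notes on version B (the rewrite author's own statement) =====
-- stated objective: alternative
-- what changed: A makes one forward pass over the rows, overwriting a mutable years-keyed dict guarded by a per-row membership test; B keeps no accumulator at all: it computes each output column independently by scanning the reversed row list for the first matching programYear (forward last-write-wins = reverse first-match).
import Mathlib
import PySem

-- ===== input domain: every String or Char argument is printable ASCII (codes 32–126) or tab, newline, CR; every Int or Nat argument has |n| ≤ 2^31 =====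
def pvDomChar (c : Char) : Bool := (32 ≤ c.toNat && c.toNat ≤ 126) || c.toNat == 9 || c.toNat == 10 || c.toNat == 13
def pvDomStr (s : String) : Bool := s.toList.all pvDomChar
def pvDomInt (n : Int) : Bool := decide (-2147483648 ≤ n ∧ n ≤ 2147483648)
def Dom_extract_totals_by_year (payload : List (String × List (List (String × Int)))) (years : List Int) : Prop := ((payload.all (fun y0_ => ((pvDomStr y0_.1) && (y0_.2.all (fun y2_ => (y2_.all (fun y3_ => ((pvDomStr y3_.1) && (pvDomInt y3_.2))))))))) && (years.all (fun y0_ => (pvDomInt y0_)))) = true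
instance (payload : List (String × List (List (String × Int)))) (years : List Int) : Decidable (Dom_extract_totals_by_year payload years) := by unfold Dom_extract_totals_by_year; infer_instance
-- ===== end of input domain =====

-- B drops A's mutable accumulator: each column total_y is computed independently by a
-- reverse-order first-match search over the rows (objective: alternative decomposition).

-- the f-string key f"total_{y}" both Python versions build
def pvKey (y : Int) : String := "total_" ++ PySem.Int.toStr y

-- ===== PORT A =====
def extract_totals_by_year (payload : List (String × List (List (String × Int)))) (years : List Int) : List (String × Option Int) :=
  -- payload is a dict by type; items = payload.get("summaryByAvailableYear");
  -- out = {f"total_{y}": 0 for y in years} (the years.foldl below, written at both uses)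
  match List.lookup "summaryByAvailableYear" payload with
  | none =>                         -- missing key → None is not a list → return out
    (years.foldl (fun d y => d.insert (pvKey y) (some 0)) PySem.Dict.empty).items
  | some items =>
    (items.foldl (fun out row =>
      match List.lookup "programYear" row with
      | none => out                 -- py is None → continue
      | some py =>
        -- py_int = int(str(py)): on an int this round-trips, py_int = py (never raises)
        if py ∈ years then
          -- out[f"total_{py_int}"] = int(gt) if gt is not None else 0  (gt an int: no exception)
          out.insert (pvKey py) (some ((List.lookup "generalTransactions" row).getD 0))
        else out)
      (years.foldl (fun d y => d.insert (pvKey y) (some 0)) PySem.Dict.empty)).items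

-- ===== PORT B =====
-- _first_total(rows, y): scan rows, return the value of the first row matching y, else 0
def pvFirstTotal (rows : List (List (String × Int))) (y : Int) : Int :=
  match rows with
  | [] => 0
  | row :: rest =>
    match List.lookup "programYear" row with
    | none => pvFirstTotal rest y        -- py is None → continue
    | some py =>
      -- py_int = int(str(py)) = py (int round-trip, never raises)
      if py ≠ y then pvFirstTotal rest y -- continue
      else (List.lookup "generalTransactions" row).getD 0
        -- int(gt) if gt is not None else 0 (gt an int: no exception)

def extract_totals_by_year_alt (payload : List (String × List (List (String × Int)))) (years : List Int) : List (String × Option Int) :=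
  -- items = payload.get("summaryByAvailableYear") if it is a list else []
  let items : List (List (String × Int)) :=
    match List.lookup "summaryByAvailableYear" payload with
    | some l => l
    | none => []
  -- rows = list(reversed(items)); {f"total_{y}": _first_total(rows, y) for y in years}
  let rows := items.reverse
  (years.foldl (fun d y => d.insert (pvKey y) (some (pvFirstTotal rows y))) PySem.Dict.empty).items

-- ===== PRECONDITION & SPEC =====
def Spec_extract_totals_by_year (payload : List (String × List (List (String × Int)))) (years : List Int) (out : List (String × Option Int)) : Prop := out = extract_totals_by_year_alt payload years
instance (payload : List (String × List (List (String × Int)))) (years : List Int) (out : List (String × Option Int)) : Decidable (Spec_extract_totals_by_year payload years out) := by unfold Spec_extract_totals_by_year; infer_instance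

-- ===== CLAIM (what is proved, stated in full; the proofs are below) =====
def Claim_equal_extract_totals_by_year : Prop := ∀ (payload : List (String × List (List (String × Int)))) (years : List Int), Dom_extract_totals_by_year payload years → Spec_extract_totals_by_year payload years (extract_totals_by_year payload years)

-- ===== LEMMAS AND PROOFS =====

-- `Nat.digitChar` is injective below 10
theorem pv_digitChar_inj {a b : Nat} (ha : a < 10) (hb : b < 10)
    (h : Nat.digitChar a = Nat.digitChar b) : a = b := by
  have key : ∀ a b : Fin 10, Nat.digitChar a = Nat.digitChar b → (a : Nat) = b := by decide
  exact key ⟨a, ha⟩ ⟨b, hb⟩ h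

theorem pv_toDigits_ne_nil (n : Nat) : Nat.toDigits 10 n ≠ [] := by
  rw [Nat.toDigits_eq_if (by norm_num)]
  split <;> simp

theorem pv_toDigits_inj : ∀ m n : Nat, Nat.toDigits 10 m = Nat.toDigits 10 n → m = n := by
  intro m
  induction m using Nat.strong_induction_on with
  | _ m IH =>
    intro n h
    rw [Nat.toDigits_eq_if (by norm_num)] at h
    rw [Nat.toDigits_eq_if (b := 10) (n := n) (by norm_num)] at h
    split at h <;> split at h
    · rename_i hm hn
      simp only [List.cons.injEq] at h
      exact pv_digitChar_inj hm hn h.1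
    · exfalso
      cases hx : Nat.toDigits 10 (n / 10) with
      | nil => exact pv_toDigits_ne_nil _ hx
      | cons a l => rw [hx] at h; simp at h
    · exfalso
      cases hx : Nat.toDigits 10 (m / 10) with
      | nil => exact pv_toDigits_ne_nil _ hx
      | cons a l => rw [hx] at h; simp at h
    · rename_i hm hn
      have h2 := List.append_inj' h (by simp)
      have hpre := IH (m / 10) (by omega) (n / 10) h2.1
      have hlast : (m % 10 : Nat) = n % 10 := by
        have := h2.2
        simp only [List.cons.injEq] at this
        exact pv_digitChar_inj (Nat.mod_lt _ (by norm_num)) (Nat.mod_lt _ (by norm_num)) this.1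
      omega

theorem pv_no_dash (n : Nat) : '-' ∉ Nat.toDigits 10 n := by
  induction n using Nat.strong_induction_on with
  | _ n IH =>
    have hd : ∀ k : Fin 10, Nat.digitChar (k : Nat) ≠ '-' := by decide
    rw [Nat.toDigits_eq_if (by norm_num)]
    split
    · rename_i hn
      intro hmem
      have : '-' = Nat.digitChar n := by simpa using hmem
      exact hd ⟨n, hn⟩ this.symm
    · rename_i hn
      intro hmem
      rcases List.mem_append.1 hmem with h1 | h2
      · exact IH (n / 10) (by omega) h1
      · have : '-' = Nat.digitChar (n % 10) := by simpa using h2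
        exact hd ⟨n % 10, Nat.mod_lt _ (by norm_num)⟩ this.symm

theorem pv_toStr_inj {a b : Int} (h : PySem.Int.toStr a = PySem.Int.toStr b) : a = b := by
  have h' : PySem.Int.toChars a = PySem.Int.toChars b := by
    rw [← PySem.Int.toList_toStr, ← PySem.Int.toList_toStr, h]
  unfold PySem.Int.toChars at h'
  split_ifs at h' with ha hb hb
  · simp only [List.cons.injEq] at h'
    have := pv_toDigits_inj _ _ h'.2
    omega
  · exfalso
    have : '-' ∈ Nat.toDigits 10 b.toNat := by rw [← h']; simp
    exact pv_no_dash _ this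
  · exfalso
    have : '-' ∈ Nat.toDigits 10 a.toNat := by rw [h']; simp
    exact pv_no_dash _ this
  · have := pv_toDigits_inj _ _ h'
    omega

theorem pvKey_inj {a b : Int} (h : pvKey a = pvKey b) : a = b := by
  apply pv_toStr_inj
  have := congrArg String.toList h
  simp only [pvKey, String.toList_append] at this
  exact String.toList_injective (List.append_cancel_left this)

-- getD through an insert-fold touching only other keys
theorem pv_getD_foldl_untouched {α κ ν : Type} [BEq κ] [LawfulBEq κ]
    (l : List α) (k : α → κ) (v : α → ν) (q : κ) (d0 : ν) :
    ∀ (d : PySem.Dict κ ν), (∀ x ∈ l, k x ≠ q) →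
    (l.foldl (fun d x => d.insert (k x) (v x)) d).getD q d0 = d.getD q d0 := by
  induction l with
  | nil => intro d _; rfl
  | cons x xs IH =>
    intro d h
    simp only [List.foldl_cons]
    rw [IH _ (fun y hy => h y (List.mem_cons_of_mem _ hy))]
    exact PySem.Dict.getD_insert_of_ne _ _ _ (Ne.symm (h x List.mem_cons_self))

-- getD through an insert-fold that writes a single value w at q
theorem pv_getD_foldl_last {α κ ν : Type} [BEq κ] [LawfulBEq κ]
    (l : List α) (k : α → κ) (v : α → ν) (q : κ) (d0 : ν) (w : ν)
    (hw : ∀ x ∈ l, k x = q → v x = w) (hm : ∃ x ∈ l, k x = q) :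
    ∀ (d : PySem.Dict κ ν),
    (l.foldl (fun d x => d.insert (k x) (v x)) d).getD q d0 = w := by
  induction l with
  | nil => exact absurd hm (by simp)
  | cons x xs IH =>
    intro d
    simp only [List.foldl_cons]
    by_cases hex : ∃ y ∈ xs, k y = q
    · exact IH (fun y hy => hw y (List.mem_cons_of_mem _ hy)) hex _
    · have hkx : k x = q := by
        rcases hm with ⟨y, hy, hky⟩
        rcases List.mem_cons.1 hy with rfl | hy'
        · exact hky
        · exact absurd ⟨y, hy', hky⟩ hex
      have hno : ∀ y ∈ xs, k y ≠ q := fun y hy hq => hex ⟨y, hy, hq⟩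
      rw [pv_getD_foldl_untouched xs k v q d0 _ hno]
      rw [← hkx, PySem.Dict.getD_insert_self]
      exact hw x List.mem_cons_self hkx

-- A's row loop never adds keys: they stay exactly out0's keys
theorem pv_keysA (years : List Int) :
    ∀ (items : List (List (String × Int))) (out : PySem.Dict String (Option Int)),
    (∀ y ∈ years, (pvKey y) ∈ out.keys) →
    (items.foldl (fun out row =>
      match List.lookup "programYear" row with
      | none => out
      | some py =>
        if py ∈ years then
          out.insert (pvKey py) (some ((List.lookup "generalTransactions" row).getD 0))
        else out) out).keys = out.keys := by
  intro items
  induction items with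
  | nil => intro out _; rfl
  | cons row rest IH =>
    intro out hout
    simp only [List.foldl_cons]
    cases hlk : List.lookup "programYear" row with
    | none => exact IH out hout
    | some py =>
      by_cases hpy : py ∈ years
      · simp only [hpy, if_true]
        have hcont : out.contains (pvKey py) = true :=
          (PySem.Dict.contains_iff_mem_keys _ _).2 (hout py hpy)
        have hkeys := PySem.Dict.keys_insert_of_contains
          (d := out) (k := pvKey py)
          (v := some ((List.lookup "generalTransactions" row).getD 0)) hcont
        rw [IH _ (fun y hy => by rw [hkeys]; exact hout y hy), hkeys]
      · simp only [hpy, if_false]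
        exact IH out hout

-- proof-only generalisation of pvFirstTotal with an arbitrary default
def pvFT (rows : List (List (String × Int))) (y : Int) (v : Int) : Int :=
  match rows with
  | [] => v
  | row :: rest =>
    match List.lookup "programYear" row with
    | none => pvFT rest y v
    | some py =>
      if py ≠ y then pvFT rest y v
      else (List.lookup "generalTransactions" row).getD 0

theorem pvFT_zero (y : Int) : ∀ rows, pvFT rows y 0 = pvFirstTotal rows y := by
  intro rows
  induction rows with
  | nil => rfl
  | cons row rest IH =>
    simp only [pvFT, pvFirstTotal]
    cases List.lookup "programYear" row with
    | none => exact IH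
    | some py =>
      by_cases h : py = y
      · simp [h]
      · simp [h, IH]

-- appending one row at the end only changes the fallback default
theorem pvFT_append (y : Int) (row : List (String × Int)) (v : Int) :
    ∀ rows, pvFT (rows ++ [row]) y v
      = pvFT rows y (match List.lookup "programYear" row with
        | none => v
        | some py => if py ≠ y then v else (List.lookup "generalTransactions" row).getD 0) := by
  intro rows
  induction rows with
  | nil =>
    cases hpy : List.lookup "programYear" row with
    | none => simp [pvFT, hpy]
    | some py => by_cases h : py = y <;> simp [pvFT, hpy, h]
  | cons r rest IH =>
    simp only [List.cons_append, pvFT]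
    cases List.lookup "programYear" r with
    | none => exact IH
    | some py => by_cases h : py = y <;> simp [h, IH]

-- joint invariant: A's out at key y after the forward fold is the reverse first-match value
theorem pv_A_getD (years : List Int) (y : Int) (hy : y ∈ years) :
    ∀ (items : List (List (String × Int))) (out : PySem.Dict String (Option Int)) (v : Int),
    out.getD (pvKey y) none = some v →
    ((items.foldl (fun out row =>
      match List.lookup "programYear" row with
      | none => out
      | some py =>
        if py ∈ years then
          out.insert (pvKey py) (some ((List.lookup "generalTransactions" row).getD 0))
        else out) out).getD (pvKey y) none = some (pvFT items.reverse y v)) := by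
  intro items
  induction items with
  | nil => intro out v h; exact h
  | cons row rest IH =>
    intro out v h
    simp only [List.foldl_cons, List.reverse_cons, pvFT_append]
    cases hlk : List.lookup "programYear" row with
    | none => exact IH out v h
    | some py =>
      by_cases hpv : py = y
      · subst hpv
        simp only [hy, if_true, ne_eq, not_true_eq_false, if_false]
        exact IH _ _ (PySem.Dict.getD_insert_self _ _ _ _)
      · simp only [ne_eq, hpv, not_false_eq_true, if_true]
        by_cases hpy : py ∈ years
        · simp only [hpy, if_true]
          apply IH
          rw [PySem.Dict.getD_insert_of_ne _ _ _ (fun hq => hpv (pvKey_inj hq).symm), h]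
        · simp only [hpy, if_false]
          exact IH out v h

theorem pv_main (payload : List (String × List (List (String × Int)))) (years : List Int) :
    extract_totals_by_year payload years = extract_totals_by_year_alt payload years := by
  unfold extract_totals_by_year extract_totals_by_year_alt
  cases hlk : List.lookup "summaryByAvailableYear" payload with
  | none => rfl
  | some items =>
    simp only
    set rows := items.reverse with hrows
    set out0 : PySem.Dict String (Option Int) :=
      years.foldl (fun d y => d.insert (pvKey y) (some 0)) PySem.Dict.empty with hout0
    set L : PySem.Dict String (Option Int) := items.foldl (fun out row =>
      match List.lookup "programYear" row with
      | none => out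
      | some py =>
        if py ∈ years then
          out.insert (pvKey py) (some ((List.lookup "generalTransactions" row).getD 0))
        else out) out0 with hL
    set R : PySem.Dict String (Option Int) :=
      years.foldl (fun d y => d.insert (pvKey y) (some (pvFirstTotal rows y))) PySem.Dict.empty with hR
    show L.items = R.items
    have keys0 : out0.keys = PySem.Set.ofList (years.map pvKey) := by
      rw [hout0, PySem.Dict.keys_foldl_insert_key years pvKey (fun _ _ => some 0),
        PySem.Dict.keys_empty, PySem.Set.update_nil_left]
    have keysR : R.keys = PySem.Set.ofList (years.map pvKey) := by
      rw [hR, PySem.Dict.keys_foldl_insert_key years pvKey (fun _ y => some (pvFirstTotal rows y)),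
        PySem.Dict.keys_empty, PySem.Set.update_nil_left]
    have hmem0 : ∀ y ∈ years, pvKey y ∈ out0.keys := by
      intro y hy
      rw [keys0]
      exact (PySem.Set.mem_ofList _ _).2 (List.mem_map_of_mem hy)
    have keysL : L.keys = out0.keys := by
      rw [hL]
      exact pv_keysA years items out0 hmem0
    have nodupL : L.keys.Nodup := by
      rw [keysL, keys0]; exact PySem.Set.nodup_ofList _
    have nodupR : R.keys.Nodup := by
      rw [keysR]; exact PySem.Set.nodup_ofList _
    rw [PySem.Dict.items_eq_map_keys L nodupL none,
      PySem.Dict.items_eq_map_keys R nodupR none, keysL, keys0, keysR]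
    apply List.map_congr_left
    intro k hk
    rcases List.mem_map.1 ((PySem.Set.mem_ofList _ _).1 hk) with ⟨y, hy, rfl⟩
    have hRv : R.getD (pvKey y) none = some (pvFirstTotal rows y) := by
      rw [hR]
      exact pv_getD_foldl_last years pvKey (fun y' => some (pvFirstTotal rows y')) (pvKey y) none
        (some (pvFirstTotal rows y)) (fun y' _ hq => by rw [pvKey_inj hq]) ⟨y, hy, rfl⟩ _
    have h0 : out0.getD (pvKey y) none = some 0 := by
      rw [hout0]
      exact pv_getD_foldl_last years pvKey (fun _ => some 0) (pvKey y) none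
        (some 0) (fun _ _ _ => rfl) ⟨y, hy, rfl⟩ _
    have hLv : L.getD (pvKey y) none = some (pvFirstTotal rows y) := by
      rw [hL, hrows, ← pvFT_zero]
      exact pv_A_getD years y hy items out0 0 h0
    rw [hLv, hRv]

-- ===== VERDICT (by name: the statement is the Claim_ definition above) =====
theorem extract_totals_by_year_spec : Claim_equal_extract_totals_by_year := by
  intro payload years _
  exact pv_main payload years
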